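-- pv_equiv track=rewrite | github.com/MilenaChowaniec/python_laby | nauka_python.py | find_min_elem_idx
-- ===== SOURCE A (Python) =====
-- def find_min_elem_idx(M):
--     A = []
--     for i in range(len(M)):
--         min_val = 1
--         idx = 0
--         for j in range(len(M[i])):
--             if min_val > M[i][j]:
--                 min_val = M[i][j]
--                 idx = j
--         A.append(idx)
--     return A
-- ===== SOURCE B (Python) =====
-- def find_min_elem_idx(M):
--     return [row.index(min(row)) if row else 0 for row in M]
-- ===== Notes on version B (the rewrite author's own statement) =====
-- stated objective: simpler
-- what changed: Replaces A's hand-written running-(min_val, idx) scan per row by min() followed by a first-index lookup (row.index), with an explicit 0 default for empty rows.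
-- intended difference: On matrices containing a row whose minimum is >= 1 and does not occur at index 0, A returns 0 for that row (its running minimum is initialized to 1 so no element < 1 ever updates idx), while B returns the first index of the row's true minimum, which is what an argmin helper is meant to compute. — e.g. on find_min_elem_idx([[2, 1]]): A returns [0], B returns [1]
import Mathlib
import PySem

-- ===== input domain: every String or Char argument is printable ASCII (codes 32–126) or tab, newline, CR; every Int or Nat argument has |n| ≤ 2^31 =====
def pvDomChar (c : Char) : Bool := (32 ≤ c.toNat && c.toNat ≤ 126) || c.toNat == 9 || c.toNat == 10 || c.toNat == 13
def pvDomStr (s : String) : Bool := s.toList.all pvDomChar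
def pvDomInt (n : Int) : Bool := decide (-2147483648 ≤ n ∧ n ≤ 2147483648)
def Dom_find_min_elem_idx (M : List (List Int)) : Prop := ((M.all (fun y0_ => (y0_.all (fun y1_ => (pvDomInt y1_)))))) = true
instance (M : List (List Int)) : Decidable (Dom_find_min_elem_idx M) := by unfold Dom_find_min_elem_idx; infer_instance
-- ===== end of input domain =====

-- B computes each row's first argmin via min() + index() instead of A's running-(min_val, idx) scan; objective: simpler.

-- ===== PORT A =====
-- inner loop of A: j runs over the row's indices, state (min_val, idx)
def pvLoopA : List Int → Nat → Int × Int → Int × Int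
  | [], _, st => st
  | x :: t, j, st => pvLoopA t (j + 1) (if st.1 > x then (x, (j : Int)) else st)

def find_min_elem_idx (M : List (List Int)) : List Int :=
  M.foldl (fun A r => A ++ [(pvLoopA r 0 (1, 0)).2]) []

-- ===== PORT B =====
def pvRowB (r : List Int) : Int :=
  match PySem.List.min? r (fun x => x) with
  | none => 0  -- B's explicit `if row else 0` default for an empty row
  | some m => ((PySem.List.index? r m).getD 0 : Nat)

def find_min_elem_idx_alt (M : List (List Int)) : List Int :=
  M.map pvRowB

-- ===== PRECONDITION & SPEC =====
-- On matrices with a row whose minimum is ≥ 1 and does not occur at index 0, A returns 0 for that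
-- row (its running minimum starts at 1, so nothing < 1 ever updates idx), while B returns the
-- first index of the row's true minimum — the value an argmin helper is meant to compute.
def D_find_min_elem_idx (M : List (List Int)) : Prop :=
  ∃ r ∈ M, (∀ x ∈ r, 1 ≤ x) ∧ ∃ x ∈ r, x < r.headD 0
instance (M : List (List Int)) : Decidable (D_find_min_elem_idx M) := by unfold D_find_min_elem_idx; infer_instance

def Spec_find_min_elem_idx (M : List (List Int)) (out : List Int) : Prop := ¬ D_find_min_elem_idx M → out = find_min_elem_idx_alt M
instance (M : List (List Int)) (out : List Int) : Decidable (Spec_find_min_elem_idx M out) := by unfold Spec_find_min_elem_idx; infer_instance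

def pvDiffWitness_find_min_elem_idx : List (List Int) := [[2, 1]]
def pvDiffWitnessOut_find_min_elem_idx : (List Int) × (List Int) := ([0], [1])

-- ===== CLAIM (what is proved, stated in full; the proofs are below) =====
def Claim_unchanged_find_min_elem_idx : Prop := ∀ (M : List (List Int)), Dom_find_min_elem_idx M →  Spec_find_min_elem_idx M (find_min_elem_idx M)
def Claim_changed_find_min_elem_idx : Prop := Dom_find_min_elem_idx (pvDiffWitness_find_min_elem_idx) ∧ D_find_min_elem_idx (pvDiffWitness_find_min_elem_idx) ∧ find_min_elem_idx (pvDiffWitness_find_min_elem_idx) = pvDiffWitnessOut_find_min_elem_idx.1 ∧ find_min_elem_idx_alt (pvDiffWitness_find_min_elem_idx) = pvDiffWitnessOut_find_min_elem_idx.2 ∧ pvDiffWitnessOut_find_min_elem_idx.1 ≠ pvDiffWitnessOut_find_min_elem_idx.2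
def Claim_exact_find_min_elem_idx : Prop := ∀ (M : List (List Int)), Dom_find_min_elem_idx M →  D_find_min_elem_idx M → find_min_elem_idx M ≠ find_min_elem_idx_alt M

-- ===== LEMMAS AND PROOFS =====

-- The running scan computes the minimum (capped by the incoming min_val) and the
-- first index where that minimum occurs, offset by j.
lemma pvLoopA_spec : ∀ (t : List Int) (j : Nat) (mv idx : Int),
    pvLoopA t j (mv, idx) =
      match PySem.List.min? t (fun x => x) with
      | none => (mv, idx)
      | some m => if m < mv then (m, ((j : Int) + ((PySem.List.index? t m).getD 0 : Nat))) else (mv, idx) := by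
  intro t
  induction t with
  | nil => intro j mv idx; simp [pvLoopA, PySem.List.min?]
  | cons x t ih =>
    intro j mv idx
    have hmin : PySem.List.min? (x :: t) (fun x => x) = some (t.foldl min x) :=
      PySem.List.min?_id_cons x t
    rw [hmin]
    have hfm := PySem.List.foldl_min_le t x
    simp only [pvLoopA]
    by_cases hx : mv > x
    · simp only [if_pos hx]
      rw [ih (j + 1) x ((j : Int))]
      rcases PySem.List.foldl_min_mem t x with hm | hm
      · -- minimum is x itself
        rw [hm]
        have : ¬ (x < x) := lt_irrefl x
        cases ht : PySem.List.min? t (fun x => x) with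
        | none =>
          simp only [if_pos hx]
          simp [List.idxOf?, List.findIdx?_cons]
        | some m =>
          have hmem := PySem.List.min?_mem ht
          have hle := hfm.2 m hmem
          have : ¬ (m < x) := not_lt.mpr (hm ▸ hle)
          simp only [if_neg this, if_pos hx]
          simp [List.idxOf?, List.findIdx?_cons]
      · -- minimum m = foldl min t x lies in t and is < x (cases)
        cases ht : PySem.List.min? t (fun x => x) with
        | none =>
          have : t = [] := (PySem.List.min?_eq_none_iff t _).mp ht
          subst this; simp at hm
        | some m =>
          have hmin_le : ∀ y ∈ t, t.foldl min x ≤ y := hfm.2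
          have hmle : m ∈ t := PySem.List.min?_mem ht
          have h1 : t.foldl min x ≤ m := hmin_le m hmle
          have h2 : m ≤ t.foldl min x := PySem.List.min?_isMin ht _ hm
          have hmm : t.foldl min x = m := le_antisymm h1 h2
          subst hmm
          by_cases hlt : t.foldl min x < x
          · simp only [if_pos hlt, if_pos (lt_trans hlt hx)]
            have hne : x ≠ t.foldl min x := (ne_of_gt hlt)
            rw [PySem.List.index?_cons_of_ne t hne]
            cases hidx : PySem.List.index? t (t.foldl min x) with
            | none =>
              exfalso
              exact ((PySem.List.index?_eq_none_iff _ _).mp hidx) hm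
            | some k =>
              simp only [Option.map_some, Option.getD_some]
              refine Prod.ext rfl ?_
              push_cast; ring
          · have hge : x ≤ t.foldl min x := not_lt.mp hlt
            have hxeq : t.foldl min x = x := le_antisymm hfm.1 hge
            rw [hxeq]
            simp only [if_neg (lt_irrefl x), if_pos hx]
            simp [List.idxOf?, List.findIdx?_cons]
    · -- no update: x does not beat mv
      simp only [if_neg hx]
      rw [ih (j + 1) mv idx]
      have hxge : mv ≤ x := not_lt.mp hx
      cases ht : PySem.List.min? t (fun x => x) with
      | none =>
        have : t = [] := (PySem.List.min?_eq_none_iff t _).mp ht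
        subst this
        simp only []
        have : ¬ (x < mv) := not_lt.mpr hxge
        simp [this]
      | some m =>
        have hmle : m ∈ t := PySem.List.min?_mem ht
        have hfold_le_m : t.foldl min x ≤ m := hfm.2 m hmle
        by_cases hmv : m < mv
        · simp only [if_pos hmv]
          have hmx : m < x := lt_of_lt_of_le hmv hxge
          have h2 : m ≤ t.foldl min x := by
            rcases PySem.List.foldl_min_mem t x with h | h
            · rw [h]; exact le_of_lt hmx
            · exact PySem.List.min?_isMin ht _ h
          have hmm : t.foldl min x = m := le_antisymm hfold_le_m h2
          rw [hmm]
          simp only [if_pos hmv]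
          have hne : x ≠ m := (ne_of_gt hmx)
          rw [PySem.List.index?_cons_of_ne t hne]
          cases hidx : PySem.List.index? t m with
          | none => exfalso; exact ((PySem.List.index?_eq_none_iff _ _).mp hidx) hmle
          | some k =>
            simp only [Option.map_some, Option.getD_some]
            refine Prod.ext rfl ?_
            push_cast; ring
        · simp only [if_neg hmv]
          have hmge : mv ≤ m := not_lt.mp hmv
          have : ¬ (t.foldl min x < mv) := by
            rcases PySem.List.foldl_min_mem t x with h | h
            · rw [h]; exact not_lt.mpr hxge
            · exact not_lt.mpr (le_trans hmge (PySem.List.min?_isMin ht _ h))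
          simp [this]

-- A's row value, in closed form
def pvRowA (r : List Int) : Int := (pvLoopA r 0 (1, 0)).2

lemma pvFoldA (M : List (List Int)) : ∀ acc : List Int,
    M.foldl (fun A r => A ++ [(pvLoopA r 0 (1, 0)).2]) acc = acc ++ M.map pvRowA := by
  induction M with
  | nil => intro acc; simp
  | cons r t ih =>
    intro acc
    simp only [List.foldl_cons, List.map_cons]
    rw [ih]
    simp [pvRowA]

-- On a nonempty row that does not satisfy D_'s per-row condition, A's scan agrees with B's min+index.
lemma pvRow_eq (r : List Int)
    (hnd : ¬ ((∀ x ∈ r, 1 ≤ x) ∧ ∃ x ∈ r, x < r.headD 0)) : pvRowA r = pvRowB r := by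
  unfold pvRowA pvRowB
  rw [pvLoopA_spec r 0 1 0]
  cases ht : PySem.List.min? r (fun x => x) with
  | none => simp
  | some m =>
    by_cases hm : m < 1
    · cases hidx : PySem.List.index? r m with
      | none =>
        exact absurd (PySem.List.min?_mem ht) ((PySem.List.index?_eq_none_iff _ _).mp hidx)
      | some k => simp [hm]
    · -- m ≥ 1: every element ≥ 1, so ¬∃ x < head, so the head is minimal and index?(m) = 0
      have hall : ∀ x ∈ r, 1 ≤ x := fun x hx =>
        le_trans (not_lt.mp hm) (PySem.List.min?_isMin ht x hx)
      have hnohead : ∀ x ∈ r, ¬ (x < r.headD 0) := by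
        intro x hx hlt
        exact hnd ⟨hall, x, hx, hlt⟩
      cases r with
      | nil => simp [PySem.List.min?] at ht
      | cons h t =>
        have hmem : m ∈ h :: t := PySem.List.min?_mem ht
        have hhm : h ≤ m := not_lt.mp (hnohead m hmem)
        have hmh : m ≤ h := PySem.List.min?_isMin ht h (List.mem_cons_self)
        have : m = h := le_antisymm hmh hhm
        subst this
        simp [hm, List.idxOf?, List.findIdx?_cons]

-- if two maps over M agree, they agree on every member
lemma pvMap_ne {α β : Type} [DecidableEq β] (f g : α → β) (M : List α) (r : α)
    (hr : r ∈ M) (hne : f r ≠ g r) : M.map f ≠ M.map g := by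
  induction M with
  | nil => cases hr
  | cons a t ih =>
    intro h
    simp only [List.map_cons, List.cons.injEq] at h
    rcases List.mem_cons.mp hr with heq | hmem
    · exact hne (heq ▸ h.1)
    · exact ih hmem h.2

-- on a row inside D_'s per-row condition, A returns 0 while B returns a positive index
lemma pvRow_ne (r : List Int) (hall : ∀ x ∈ r, 1 ≤ x)
    (hx : ∃ x ∈ r, x < r.headD 0) : pvRowA r ≠ pvRowB r := by
  obtain ⟨x, hxr, hxlt⟩ := hx
  cases r with
  | nil => cases hxr
  | cons h t =>
    unfold pvRowA pvRowB
    rw [pvLoopA_spec _ 0 1 0]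
    rw [PySem.List.min?_id_cons]
    set m := t.foldl min h with hm
    have ht : PySem.List.min? (h :: t) (fun x => x) = some m := by
      rw [PySem.List.min?_id_cons]
    have h1m : 1 ≤ m := hall m (PySem.List.min?_mem ht)
    have hnm : ¬ (m < 1) := not_lt.mpr h1m
    simp only [if_neg hnm]
    -- B's value: m < h since x < h and m ≤ x, so index starts past 0
    have hmx : m ≤ x := PySem.List.min?_isMin ht x hxr
    have hmh : m < h := lt_of_le_of_lt hmx (by simpa using hxlt)
    have hne : h ≠ m := (ne_of_gt hmh)
    have hmem_t : m ∈ t := by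
      rcases List.mem_cons.mp (PySem.List.min?_mem ht) with heq | hmem
      · exact absurd heq.symm hne
      · exact hmem
    rw [PySem.List.index?_cons_of_ne t hne]
    cases hidx : PySem.List.index? t m with
    | none => exact absurd hmem_t ((PySem.List.index?_eq_none_iff _ _).mp hidx)
    | some k =>
      simp only [Option.map_some, Option.getD_some]
      intro hzero
      omega

-- ===== VERDICT (by name: the statements are the Claim_ definitions above) =====
theorem find_min_elem_idx_spec : Claim_unchanged_find_min_elem_idx := by
  intro M _ hnd
  unfold find_min_elem_idx find_min_elem_idx_alt
  rw [pvFoldA M []]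
  simp only [List.nil_append]
  apply List.map_congr_left
  intro r hr
  apply pvRow_eq r
  intro hcond
  exact hnd ⟨r, hr, hcond⟩

theorem find_min_elem_idx_changed : Claim_changed_find_min_elem_idx := by
  unfold Claim_changed_find_min_elem_idx; decide

theorem find_min_elem_idx_tight : Claim_exact_find_min_elem_idx := by
  intro M _ hd
  obtain ⟨r, hr, hall, hx⟩ := hd
  unfold find_min_elem_idx find_min_elem_idx_alt
  rw [pvFoldA M []]
  simp only [List.nil_append]
  exact pvMap_ne pvRowA pvRowB M r hr (pvRow_ne r hall hx)
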